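-- pv_equiv track=rewrite | github.com/plasx/FBNeo | replay_visualizer.py | decode_inputs
-- ===== SOURCE A (Python) =====
-- def decode_inputs(inputs_value):
--     """
--     Decode the inputs bitmask into a list of active inputs.
--     Assuming inputs are stored as a bitmask where each bit represents a button.
--     """
--     if inputs_value is None:
--         return []
--
--     input_map = {
--         0: 'UP',
--         1: 'DOWN',
--         2: 'LEFT',
--         3: 'RIGHT',
--         4: 'BUTTON1',
--         5: 'BUTTON2',
--         6: 'BUTTON3',
--         7: 'BUTTON4',
--         8: 'BUTTON5',
--         9: 'BUTTON6',
--         10: 'START',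
--         11: 'COIN'
--     }
--
--     active_inputs = []
--     for bit, name in input_map.items():
--         if inputs_value & (1 << bit):
--             active_inputs.append(name)
--
--     return active_inputs
-- ===== SOURCE B (Python) =====
-- def decode_inputs(inputs_value):
--     if inputs_value is None:
--         return []
--     names = ['UP', 'DOWN', 'LEFT', 'RIGHT', 'BUTTON1', 'BUTTON2', 'BUTTON3',
--              'BUTTON4', 'BUTTON5', 'BUTTON6', 'START', 'COIN']
--     v = inputs_value & 0xFFF  # only the 12 mapped bits matter
--     active_inputs = []
--     while v:
--         lsb = v & -v
--         active_inputs.append(names[lsb.bit_length() - 1])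
--         v ^= lsb
--     return active_inputs
-- ===== Notes on version B (the rewrite author's own statement) =====
-- stated objective: alternative
-- what changed: A scans all 12 bit positions of a name dict and tests each; B masks the value to its 12 meaningful bits once and then peels only the set bits lowest-first (v & -v, bit_length), indexing a name list by bit position.
import Mathlib
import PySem

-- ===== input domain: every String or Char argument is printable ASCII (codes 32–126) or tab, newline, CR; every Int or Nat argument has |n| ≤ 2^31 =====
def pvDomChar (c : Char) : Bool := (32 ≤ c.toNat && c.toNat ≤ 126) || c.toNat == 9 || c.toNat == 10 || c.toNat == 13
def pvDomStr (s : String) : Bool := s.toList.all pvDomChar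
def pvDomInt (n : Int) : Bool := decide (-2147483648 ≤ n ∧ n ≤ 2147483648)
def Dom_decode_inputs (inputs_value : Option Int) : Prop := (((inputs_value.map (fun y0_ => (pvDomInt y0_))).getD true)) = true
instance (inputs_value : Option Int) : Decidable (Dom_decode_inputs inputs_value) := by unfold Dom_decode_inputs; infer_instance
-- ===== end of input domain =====

-- B replaces A's dense scan over all 12 bit positions by masking the value to the 12 mapped
-- bits once and peeling only the set bits (lowest first); objective: alternative.

-- ===== PORT A =====
-- the test `inputs_value & (1 << bit)` of A's loop body
def pvTestA (n : Int) (bit : Nat) : Bool := PySem.Int.band n ((1 : Int) <<< bit) ≠ 0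

def decode_inputs (inputs_value : Option Int) : List String :=
  match inputs_value with
  | none => []
  | some n =>
    -- dict literal {0:'UP', …, 11:'COIN'}; iterated in insertion order as (bit, name) pairs
    let input_map : List (Nat × String) :=
      [(0, "UP"), (1, "DOWN"), (2, "LEFT"), (3, "RIGHT"), (4, "BUTTON1"), (5, "BUTTON2"),
       (6, "BUTTON3"), (7, "BUTTON4"), (8, "BUTTON5"), (9, "BUTTON6"), (10, "START"), (11, "COIN")]
    input_map.foldl (fun acc p => if pvTestA n p.1 then acc ++ [p.2] else acc) []

-- ===== PORT B =====
def pvNamesB : List String :=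
  ["UP", "DOWN", "LEFT", "RIGHT", "BUTTON1", "BUTTON2", "BUTTON3",
   "BUTTON4", "BUTTON5", "BUTTON6", "START", "COIN"]

-- the `while v:` loop of Source B; the fuel 12 only makes it total (v < 2^12 and each step
-- clears one set bit, so at most 12 iterations ever run).  `names[lsb.bit_length() - 1]`
-- is ported as getD; the index is always < 12 here, so the default is never used.
def pvPeelB : Nat → Int → List String → List String
  | 0, _, acc => acc
  | fuel + 1, v, acc =>
    if v = 0 then acc
    else
      let lsb := PySem.Int.band v (-v)
      pvPeelB fuel (PySem.Int.bxor v lsb) (acc ++ [pvNamesB.getD (PySem.Int.bitLength lsb - 1) ""])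

def decode_inputs_alt (inputs_value : Option Int) : List String :=
  match inputs_value with
  | none => []
  | some n => pvPeelB 12 (PySem.Int.band n 4095) []

-- ===== PRECONDITION & SPEC =====
def Spec_decode_inputs (inputs_value : Option Int) (out : List String) : Prop := out = decode_inputs_alt inputs_value
instance (inputs_value : Option Int) (out : List String) : Decidable (Spec_decode_inputs inputs_value out) := by unfold Spec_decode_inputs; infer_instance

-- ===== CLAIM (what is proved, stated in full; the proofs are below) =====
def Claim_equal_decode_inputs : Prop := ∀ (inputs_value : Option Int), Dom_decode_inputs inputs_value → Spec_decode_inputs inputs_value (decode_inputs inputs_value)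

-- ===== LEMMAS AND PROOFS =====

-- the subtraction 4095 - a is bitwise complement within the 12-bit mask
set_option maxRecDepth 2048 in
theorem pv_sub_eq_xor64 : ∀ hi : Nat, hi < 64 → ∀ lo : Nat, lo < 64 →
    4095 - (64 * hi + lo) = 4095 ^^^ (64 * hi + lo) := by decide

theorem pv_sub_eq_xor (a : Nat) (ha : a < 4096) : 4095 - a = 4095 ^^^ a := by
  have h := pv_sub_eq_xor64 (a / 64) (by omega) (a % 64) (Nat.mod_lt _ (by omega))
  rwa [Nat.div_add_mod] at h

theorem pv_mask_idem (z : Nat) (hz : z < 4096) : z &&& 4095 = z := by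
  apply Nat.eq_of_testBit_eq
  intro i
  rw [Nat.testBit_and]
  by_cases h : i < 12
  · have h4 : Nat.testBit 4095 i = true := by interval_cases i <;> decide
    simp [h4]
  · have hz' : z.testBit i = false := by
      apply Nat.testBit_eq_false_of_lt
      calc z < 4096 := hz
        _ = 2 ^ 12 := by norm_num
        _ ≤ 2 ^ i := Nat.pow_le_pow_right (by norm_num) (by omega)
    simp [hz']

theorem pv_mask_pow : ∀ j : Nat, j < 12 → 4095 &&& (1 <<< j) = (1 <<< j) := by decide

theorem pv_neg_case (a' : Nat) (ha : a' < 4096) (j : Nat) (hj : j < 12) :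
    (1 <<< j) - ((1 <<< j) &&& a') = (4095 - a') &&& (1 <<< j) := by
  have h4 : Nat.testBit 4095 j = true := by interval_cases j <;> decide
  rw [Nat.shiftLeft_eq, one_mul, Nat.two_pow_and, Nat.and_two_pow, pv_sub_eq_xor a' ha]
  have hx : (4095 ^^^ a').testBit j = !(a'.testBit j) := by
    rw [Nat.testBit_xor, h4]; cases a'.testBit j <;> rfl
  rw [hx]; cases a'.testBit j <;> simp

theorem pv_band_mask_nonneg (n : Int) : 0 ≤ PySem.Int.band n 4095 := by
  rw [PySem.Int.band_comm]
  exact PySem.Int.band_nonneg_of_nonneg_left n (by norm_num)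

theorem pv_band_mask_lt (n : Int) : (PySem.Int.band n 4095).toNat < 4096 := by
  unfold PySem.Int.band
  have hb : (0 : Int) ≤ 4095 := by norm_num
  by_cases hn : 0 ≤ n
  · rw [if_pos hn, if_pos hb, Int.toNat_natCast]
    exact lt_of_le_of_lt Nat.and_le_right (by norm_num)
  · rw [if_neg hn, if_pos hb, Int.toNat_natCast]
    omega

theorem pv_band_mask_cast (n : Int) :
    PySem.Int.band n 4095 = ((PySem.Int.band n 4095).toNat : Int) :=
  (Int.toNat_of_nonneg (pv_band_mask_nonneg n)).symm

-- key: each of the 12 bit tests of A depends only on the masked value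
theorem pv_L1 (n : Int) (j : Nat) (hj : j < 12) :
    PySem.Int.band n ((1 : Int) <<< j) =
      (((PySem.Int.band n 4095).toNat &&& (1 <<< j) : Nat) : Int) := by
  have hcast : ((1 : Int) <<< j) = ((1 <<< j : Nat) : Int) := rfl
  have h4 : (4095 : Int) = ((4095 : Nat) : Int) := rfl
  by_cases hn : 0 ≤ n
  · rw [hcast, h4, show (n : Int) = ((n.toNat : Nat) : Int) from (Int.toNat_of_nonneg hn).symm,
      PySem.Int.band_natCast, PySem.Int.band_natCast]
    congr 1
    simp only [Int.toNat_natCast]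
    calc n.toNat &&& (1 <<< j)
        = n.toNat &&& (4095 &&& (1 <<< j)) := by rw [pv_mask_pow j hj]
      _ = (n.toNat &&& 4095) &&& (1 <<< j) := by rw [Nat.and_assoc]
  · -- n < 0: unfold the PySem definition of & on a negative left operand
    have hb1 : (0 : Int) ≤ (1 : Int) <<< j := by rw [hcast]; positivity
    have hb2 : (0 : Int) ≤ (4095 : Int) := by norm_num
    unfold PySem.Int.band
    rw [if_neg hn, if_pos hb1, if_neg hn, if_pos hb2]
    set a : Nat := (-n - 1).toNat with ha
    have h1 : ((1 : Int) <<< j).toNat = (1 <<< j : Nat) := by rw [hcast]; exact Int.toNat_natCast _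
    have h2 : ((4095 : Int)).toNat = 4095 := rfl
    rw [h1, h2]
    congr 1
    have hshift : (1 <<< j : Nat) &&& a = (1 <<< j : Nat) &&& (a &&& 4095) := by
      calc (1 <<< j : Nat) &&& a = a &&& (1 <<< j) := Nat.and_comm _ _
        _ = a &&& (4095 &&& (1 <<< j)) := by rw [pv_mask_pow j hj]
        _ = (a &&& 4095) &&& (1 <<< j) := by rw [Nat.and_assoc]
        _ = (1 <<< j) &&& (a &&& 4095) := Nat.and_comm _ _
    have ha' : a &&& 4095 < 4096 := lt_of_le_of_lt Nat.and_le_right (by norm_num)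
    have h4095 : 4095 &&& a = a &&& 4095 := Nat.and_comm _ _
    rw [hshift, h4095, Int.toNat_natCast]
    exact pv_neg_case (a &&& 4095) ha' j hj

theorem pv_r_fix (r : Nat) (hr : r < 4096) : PySem.Int.band (r : Int) 4095 = (r : Int) := by
  have h4 : (4095 : Int) = ((4095 : Nat) : Int) := rfl
  rw [h4, PySem.Int.band_natCast, pv_mask_idem r hr]

theorem pv_test_mask (n : Int) (j : Nat) (hj : j < 12) :
    pvTestA n j = pvTestA ((PySem.Int.band n 4095).toNat : Int) j := by
  unfold pvTestA
  have h2 := pv_L1 ((PySem.Int.band n 4095).toNat : Int) j hj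
  rw [pv_r_fix _ (pv_band_mask_lt n)] at h2
  simp only [Int.toNat_natCast] at h2
  rw [pv_L1 n j hj, h2]

theorem pv_A_mask (n : Int) :
    decode_inputs (some n) = decode_inputs (some ((PySem.Int.band n 4095).toNat : Int)) := by
  simp only [decode_inputs]
  apply PySem.List.foldl_congr_mem
  intro acc p hp
  have hj : p.1 < 12 := by fin_cases hp <;> norm_num
  rw [pv_test_mask n p.1 hj]

theorem pv_B_mask (n : Int) :
    decode_inputs_alt (some n) = decode_inputs_alt (some ((PySem.Int.band n 4095).toNat : Int)) := by
  simp only [decode_inputs_alt]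
  rw [pv_r_fix _ (pv_band_mask_lt n), ← pv_band_mask_cast]

-- the value common to both sides: the masked value's set-bit positions and their names
def lsbN (r : Nat) : Nat := r - (r &&& (r - 1))
def pvBits (r : Nat) : List Nat := (List.range 12).filter (r.testBit ·)
def pvName (j : Nat) : String := pvNamesB.getD j ""

set_option maxRecDepth 2048 in
theorem pv_cnt64 : ∀ hi : Nat, hi < 64 → ∀ lo : Nat, lo < 64 →
    PySem.Int.bitCount ((64 * hi + lo : Nat) : Int) ≤ 12 ∧
    (64 * hi + lo ≠ 0 → 1 ≤ PySem.Int.bitCount ((64 * hi + lo : Nat) : Int)) := by decide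

theorem pv_cnt (r : Nat) (hr : r < 4096) :
    PySem.Int.bitCount ((r : Nat) : Int) ≤ 12 ∧
    (r ≠ 0 → 1 ≤ PySem.Int.bitCount ((r : Nat) : Int)) := by
  have h := pv_cnt64 (r / 64) (by omega) (r % 64) (Nat.mod_lt _ (by omega))
  rwa [Nat.div_add_mod] at h

set_option maxRecDepth 2048 in
set_option maxHeartbeats 3000000 in
theorem pv_step64 : ∀ hi : Nat, hi < 64 → ∀ lo : Nat, lo < 64 → 64 * hi + lo ≠ 0 →
    pvBits (64 * hi + lo) =
      (PySem.Int.bitLength ((lsbN (64 * hi + lo) : Nat) : Int) - 1) :: pvBits ((64 * hi + lo) ^^^ lsbN (64 * hi + lo)) ∧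
    (64 * hi + lo) ^^^ lsbN (64 * hi + lo) = (64 * hi + lo) - lsbN (64 * hi + lo) ∧
    PySem.Int.bitCount (((64 * hi + lo) ^^^ lsbN (64 * hi + lo) : Nat) : Int) + 1 =
      PySem.Int.bitCount ((64 * hi + lo : Nat) : Int) := by decide

theorem pv_step (r : Nat) (hr : r < 4096) (h0 : r ≠ 0) :
    pvBits r = (PySem.Int.bitLength ((lsbN r : Nat) : Int) - 1) :: pvBits (r ^^^ lsbN r) ∧
    r ^^^ lsbN r = r - lsbN r ∧
    PySem.Int.bitCount ((r ^^^ lsbN r : Nat) : Int) + 1 = PySem.Int.bitCount ((r : Nat) : Int) := by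
  have h := pv_step64 (r / 64) (by omega) (r % 64) (Nat.mod_lt _ (by omega))
  rw [Nat.div_add_mod] at h
  exact h h0

-- Python's  r & -r  on a positive r is  r - (r & (r-1))  at the Nat level
theorem pv_lsb_cast (r : Nat) (h0 : r ≠ 0) :
    PySem.Int.band (r : Int) (-(r : Int)) = ((lsbN r : Nat) : Int) := by
  have hpos : (0 : Int) < (r : Int) := by exact_mod_cast Nat.pos_of_ne_zero h0
  unfold PySem.Int.band lsbN
  rw [if_pos (le_of_lt hpos), if_neg (by omega)]
  have h1 : (-(-(r : Int)) - 1).toNat = r - 1 := by omega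
  rw [h1, Int.toNat_natCast]

theorem pv_peel : ∀ (fuel r : Nat) (acc : List String), r < 4096 →
    PySem.Int.bitCount ((r : Nat) : Int) ≤ fuel →
    pvPeelB fuel ((r : Nat) : Int) acc = acc ++ (pvBits r).map pvName := by
  intro fuel
  induction fuel with
  | zero =>
    intro r acc hr hc
    have h0 : r = 0 := by
      by_contra h
      have := (pv_cnt r hr).2 h
      omega
    subst h0
    simp [pvPeelB, pvBits, Nat.zero_testBit]
  | succ fuel ih =>
    intro r acc hr hc
    by_cases h0 : r = 0
    · subst h0
      simp [pvPeelB, pvBits, Nat.zero_testBit]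
    · have hne : ((r : Nat) : Int) ≠ 0 := by exact_mod_cast h0
      obtain ⟨hbits, hsub, hcnt⟩ := pv_step r hr h0
      have hstep : pvPeelB (fuel + 1) ((r : Nat) : Int) acc =
          pvPeelB fuel (PySem.Int.bxor ((r : Nat) : Int) (PySem.Int.band ((r : Nat) : Int) (-((r : Nat) : Int))))
            (acc ++ [pvNamesB.getD
              (PySem.Int.bitLength (PySem.Int.band ((r : Nat) : Int) (-((r : Nat) : Int))) - 1) ""]) := by
        simp only [pvPeelB]
        rw [if_neg hne]
      rw [hstep, pv_lsb_cast r h0, PySem.Int.bxor_natCast]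
      have hle : lsbN r ≤ r := Nat.sub_le _ _
      have hr' : r ^^^ lsbN r < 4096 := by omega
      rw [ih (r ^^^ lsbN r) _ hr' (by omega)]
      rw [hbits]
      simp [pvName]

theorem pv_foldl_shape (t : Nat → Bool) :
    ∀ (L : List (Nat × String)) (acc : List String),
      L.foldl (fun acc p => if t p.1 then acc ++ [p.2] else acc) acc =
        acc ++ (L.filter (fun p => t p.1)).map Prod.snd := by
  intro L
  induction L with
  | nil => intro acc; simp
  | cons x xs ihx =>
    intro acc
    by_cases h : t x.1 <;> simp [List.foldl_cons, h, ihx]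

theorem pv_testA_nat (r j : Nat) : pvTestA ((r : Nat) : Int) j = r.testBit j := by
  unfold pvTestA
  have hcast : ((1 : Int) <<< j) = ((1 <<< j : Nat) : Int) := rfl
  rw [hcast, PySem.Int.band_natCast]
  cases h : r.testBit j <;>
    simp [Nat.shiftLeft_eq, Nat.and_two_pow, h]

theorem pv_A_eval (r : Nat) :
    decode_inputs (some ((r : Nat) : Int)) = (pvBits r).map pvName := by
  simp only [decode_inputs]
  rw [pv_foldl_shape (pvTestA ((r : Nat) : Int))]
  rw [List.nil_append]
  rw [List.filter_congr (fun p _ => by rw [pv_testA_nat r p.1])]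
  have hmap : ([(0, "UP"), (1, "DOWN"), (2, "LEFT"), (3, "RIGHT"), (4, "BUTTON1"), (5, "BUTTON2"),
       (6, "BUTTON3"), (7, "BUTTON4"), (8, "BUTTON5"), (9, "BUTTON6"), (10, "START"), (11, "COIN")] :
        List (Nat × String)) = (List.range 12).map (fun j => (j, pvName j)) := by rfl
  rw [hmap, List.filter_map, List.map_map]
  rfl

theorem pv_small (r : Nat) (hr : r < 4096) :
    decode_inputs (some ((r : Nat) : Int)) = decode_inputs_alt (some ((r : Nat) : Int)) := by
  rw [pv_A_eval r]
  simp only [decode_inputs_alt]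
  rw [pv_r_fix r hr, pv_peel 12 r [] hr (pv_cnt r hr).1, List.nil_append]

-- ===== VERDICT (by name: the statement is the Claim_ definition above) =====
theorem decode_inputs_spec : Claim_equal_decode_inputs := by
  intro iv _
  unfold Spec_decode_inputs
  match iv with
  | none => rfl
  | some n =>
    rw [pv_A_mask n, pv_B_mask n]
    exact pv_small _ (pv_band_mask_lt n)
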